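-- pv_equiv track=rewrite | github.com/DreamCats/coco-flow | src/coco_flow/services/knowledge/document_builder.py | is_business_route_ref
-- ===== SOURCE A (Python) =====
-- def is_business_route_ref(route: str) -> bool:
--     lowered = str(route).strip().lower()
--     segments = [segment for segment in lowered.strip("/").split("/") if segment]
--     if not segments:
--         return False
--     if len(segments) >= 2:
--         return True
--     segment = segments[0]
--     return any(segment == action or segment.startswith(f"{action}_") for action in generic_route_actions())
--
-- def generic_route_actions() -> tuple[str, ...]:
--     return ("create", "save", "update", "edit", "launch", "start", "deactivate", "delete", "remove", "status", "get", "list", "detail", "preview")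
-- ===== SOURCE B (Python) =====
-- _ACTIONS = frozenset((
--     "create", "save", "update", "edit", "launch", "start", "deactivate",
--     "delete", "remove", "status", "get", "list", "detail", "preview",
-- ))
--
--
-- def is_business_route_ref(route: str) -> bool:
--     # Single character-level pass: count the maximal '/'-free runs (two runs
--     # means a business route) while collecting the first run's prefix before
--     # its first underscore; no split(), no strip("/"), no list of segments.
--     runs = 0
--     head = ""
--     in_run = False
--     cut = False  # an underscore was seen inside the first run
--     for ch in str(route).strip().lower():
--         if ch == "/":
--             in_run = False
--             continue
--         if not in_run:
--             runs += 1
--             if runs == 2: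
--                 return True
--             in_run = True
--         if ch == "_":
--             cut = True
--         elif not cut:
--             head += ch
--     return runs == 1 and head in _ACTIONS
-- ===== Notes on version B (the rewrite author's own statement) =====
-- stated objective: alternative
-- what changed: Instead of stripping slashes, splitting into a segment list, filtering and counting it, B makes one character-level pass over the normalized string with an accumulator (run counter with early exit at the second slash-free run, in-run flag, first-run head collected up to its first underscore) and finishes with a single set-membership probe.
import Mathlib
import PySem

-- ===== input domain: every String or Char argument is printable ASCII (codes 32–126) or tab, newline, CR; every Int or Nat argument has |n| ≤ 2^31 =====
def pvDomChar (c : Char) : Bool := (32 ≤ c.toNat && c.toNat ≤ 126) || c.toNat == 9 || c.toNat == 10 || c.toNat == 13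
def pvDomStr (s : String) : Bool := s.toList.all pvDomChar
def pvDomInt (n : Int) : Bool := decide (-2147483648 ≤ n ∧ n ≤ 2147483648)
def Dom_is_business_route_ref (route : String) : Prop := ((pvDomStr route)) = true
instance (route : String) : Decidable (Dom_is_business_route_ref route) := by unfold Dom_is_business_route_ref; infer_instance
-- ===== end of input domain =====

-- B replaces A's strip('/')+split+filter segment pipeline by a single character-level
-- scan with an accumulator (run counter, first-run head before '_') and one set probe
-- (alternative decomposition, same cost).


-- ===== PORT A =====
def generic_route_actions : List String :=
  ["create", "save", "update", "edit", "launch", "start", "deactivate", "delete",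
   "remove", "status", "get", "list", "detail", "preview"]

def is_business_route_ref (route : String) : Bool :=
  let lowered := PySem.Str.lower (PySem.Str.strip route)
  let segments := ((PySem.Str.split? (PySem.Str.stripChars lowered "/") "/").getD []).filter
    (fun segment => !(segment == ""))
  if segments.isEmpty then false
  else if 2 ≤ segments.length then true
  else
    let segment := segments.headD ""
    generic_route_actions.any (fun action => segment == action || PySem.Str.startswith segment (action ++ "_"))

-- ===== PORT B =====
-- Source B's _ACTIONS frozenset (elements as char lists: the scan works character-wise)
def actionSet : PySem.Set (List Char) :=
  PySem.Set.ofList ["create".toList, "save".toList, "update".toList, "edit".toList,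
    "launch".toList, "start".toList, "deactivate".toList, "delete".toList,
    "remove".toList, "status".toList, "get".toList, "list".toList,
    "detail".toList, "preview".toList]

-- Source B's for-loop over the normalized string: state = (runs, head, in_run, cut),
-- early return True when the second '/'-free run starts
def bScan (cs : List Char) (runs : Nat) (head : List Char) (inRun cut : Bool) : Bool :=
  match cs with
  | [] => runs == 1 && PySem.Set.contains actionSet head
  | c :: rest =>
    if c == '/' then bScan rest runs head false cut
    else if !inRun && runs + 1 == 2 then true
    else
      let runs' := if !inRun then runs + 1 else runs
      if c == '_' then bScan rest runs' head true true
      else if !cut then bScan rest runs' (head ++ [c]) true cut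
      else bScan rest runs' head true cut

def is_business_route_ref_alt (route : String) : Bool :=
  bScan (PySem.Str.lower (PySem.Str.strip route)).toList 0 [] false false

-- ===== PRECONDITION & SPEC =====
def Spec_is_business_route_ref (route : String) (out : Bool) : Prop := out = is_business_route_ref_alt route
instance (route : String) (out : Bool) : Decidable (Spec_is_business_route_ref route out) := by unfold Spec_is_business_route_ref; infer_instance

-- ===== CLAIM (what is proved, stated in full; the proofs are below) =====
def Claim_equal_is_business_route_ref : Prop := ∀ (route : String), Dom_is_business_route_ref route → Spec_is_business_route_ref route (is_business_route_ref route)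

-- ===== LEMMAS AND PROOFS =====

-- simple recursion computing PySem.Chars.splitOn on the single-char separator '/'
def mySplit : List Char → List Char → List (List Char)
  | [], pre => [pre]
  | c :: rest, pre => if c = '/' then pre :: mySplit rest [] else mySplit rest (pre ++ [c])

def segs (l : List Char) : List (List Char) := (mySplit l []).filter (· ≠ [])

def headIn (s : List Char) : Bool := PySem.Set.contains actionSet (s.takeWhile (· ≠ '_'))

def decideSegs (l : List (List Char)) : Bool :=
  if l.isEmpty then false else if 2 ≤ l.length then true else headIn (l.headD [])

lemma mySplit_ne_nil : ∀ (cs pre : List Char), mySplit cs pre ≠ [] := by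
  intro cs
  induction cs with
  | nil => intro pre; simp [mySplit]
  | cons c rest ih =>
    intro pre
    simp only [mySplit]
    split
    · simp
    · exact ih _

lemma glue : ∀ (cs pre : List Char), mySplit cs pre = (mySplit cs []).modifyHead (pre ++ ·) := by
  intro cs
  induction cs with
  | nil => intro pre; simp [mySplit]
  | cons c rest ih =>
    intro pre
    simp only [mySplit]
    split
    · simp
    · rw [ih (pre ++ [c])]
      simp only [List.nil_append]
      rw [ih [c]]
      obtain ⟨h, t, he⟩ : ∃ h t, mySplit rest [] = h :: t := by
        cases hm : mySplit rest [] with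
        | nil => exact absurd hm (mySplit_ne_nil rest [])
        | cons h t => exact ⟨h, t, rfl⟩
      simp [he]

lemma segs_cons (c : Char) (rest : List Char) (hc : c ≠ '/') :
    ∃ h t, mySplit (c :: rest) [] = (c :: h) :: t := by
  simp only [mySplit, if_neg hc, List.nil_append]
  rw [glue rest [c]]
  obtain ⟨h, t, he⟩ : ∃ h t, mySplit rest [] = h :: t := by
    cases hm : mySplit rest [] with
    | nil => exact absurd hm (mySplit_ne_nil rest [])
    | cons h t => exact ⟨h, t, rfl⟩
  exact ⟨h, t, by simp [he]⟩

lemma mySplit_snoc_slash : ∀ (l pre : List Char), mySplit (l ++ ['/']) pre = mySplit l pre ++ [[]] := by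
  intro l
  induction l with
  | nil => intro pre; simp [mySplit]
  | cons c rest ih =>
    intro pre
    simp only [List.cons_append, mySplit]
    split
    · simp [ih]
    · exact ih _

lemma segs_append_replicate (l : List Char) (k : Nat) :
    segs (l ++ List.replicate k '/') = segs l := by
  induction k with
  | zero => simp
  | succ k ih =>
    rw [List.replicate_succ', ← List.append_assoc]
    unfold segs at ih ⊢
    rw [mySplit_snoc_slash, List.filter_append]
    simpa using ih

lemma segs_dropWhile (l : List Char) : segs (l.dropWhile (fun c => ['/'].contains c)) = segs l := by
  induction l with
  | nil => rfl
  | cons c rest ih =>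
    by_cases hc : c = '/'
    · subst hc
      rw [List.dropWhile_cons_of_pos (by simp)]
      rw [ih]
      simp [segs, mySplit]
    · rw [List.dropWhile_cons_of_neg (by simp [hc])]

lemma segs_strip (l : List Char) : segs (PySem.Chars.stripChars l ['/']) = segs l := by
  unfold PySem.Chars.stripChars
  set p := fun c => ['/'].contains c with hp
  set x := List.dropWhile p l with hx
  have hxsegs : segs x = segs l := segs_dropWhile l
  have hsplit : x = (List.dropWhile p x.reverse).reverse ++ (List.takeWhile p x.reverse).reverse := by
    have h := List.takeWhile_append_dropWhile (p := p) (l := x.reverse)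
    have h2 : (List.takeWhile p x.reverse ++ List.dropWhile p x.reverse).reverse = x := by
      rw [h]; simp
    rw [List.reverse_append] at h2
    exact h2.symm
  have hrep : (List.takeWhile p x.reverse).reverse = List.replicate (List.takeWhile p x.reverse).length '/' := by
    have hall : ∀ b ∈ (List.takeWhile p x.reverse).reverse, b = '/' := by
      intro b hb
      rw [List.mem_reverse] at hb
      have := List.mem_takeWhile_imp hb
      simpa [hp] using this.symm
    calc (List.takeWhile p x.reverse).reverse
        = List.replicate (List.takeWhile p x.reverse).reverse.length '/' := List.eq_replicate_of_mem hall
      _ = List.replicate (List.takeWhile p x.reverse).length '/' := by rw [List.length_reverse]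
  rw [← hxsegs]
  conv_rhs => rw [hsplit, hrep]
  rw [segs_append_replicate]

lemma go_spec : ∀ (fuel : Nat) (l cur : List Char) (acc : List (List Char)),
    l.length ≤ fuel →
    PySem.Chars.splitOn.go ['/'] fuel l cur acc = acc.reverse ++ mySplit l cur.reverse := by
  intro fuel
  induction fuel with
  | zero =>
    intro l cur acc hl
    have : l = [] := List.eq_nil_of_length_eq_zero (Nat.le_zero.mp hl)
    subst this
    simp [PySem.Chars.splitOn.go, mySplit]
  | succ fuel ih =>
    intro l cur acc hl
    cases l with
    | nil => simp [PySem.Chars.splitOn.go, mySplit]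
    | cons c rest =>
      rw [PySem.Chars.splitOn.go]
      by_cases hc : c = '/'
      · subst hc
        rw [if_pos (by simp [List.isPrefixOf])]
        rw [ih _ _ _ (by simpa using Nat.le_of_succ_le_succ hl)]
        simp [mySplit]
      · rw [if_neg (by simp [List.isPrefixOf]; exact fun h => hc h.symm)]
        rw [ih _ _ _ (by simpa using Nat.le_of_succ_le_succ hl)]
        simp [mySplit, hc]

lemma splitOn_eq (l : List Char) : PySem.Chars.splitOn l ['/'] = mySplit l [] := by
  unfold PySem.Chars.splitOn
  rw [go_spec _ _ _ _ (by omega)]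
  simp

lemma tw_self (pre : List Char) (h : '_' ∉ pre) : pre.takeWhile (· ≠ '_') = pre := by
  rw [List.takeWhile_eq_self_iff]
  intro a ha
  simp only [ne_eq, decide_eq_true_eq]
  exact fun he => h (he ▸ ha)

lemma tw_append (pre : List Char) (c : Char) (h : '_' ∈ pre ∨ c = '_') :
    (pre ++ [c]).takeWhile (· ≠ '_') = pre.takeWhile (· ≠ '_') := by
  rw [List.takeWhile_append]
  split_ifs with hlen
  · have heq : pre.takeWhile (· ≠ '_') = pre :=
      (List.takeWhile_prefix _).eq_of_length hlen
    have hnot : '_' ∉ pre := by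
      intro hm
      have := List.takeWhile_eq_self_iff.mp heq '_' hm
      simp at this
    have hc : c = '_' := h.resolve_left hnot
    subst hc
    rw [show List.takeWhile (· ≠ '_') ['_'] = ([] : List Char) from rfl, List.append_nil, heq]
  · rfl

lemma scan_false : ∀ (cs pre : List Char), pre ≠ [] →
    bScan cs 1 (pre.takeWhile (· ≠ '_')) false (decide ('_' ∈ pre)) =
      if (segs cs).isEmpty then headIn pre else true := by
  intro cs
  induction cs with
  | nil =>
    intro pre hpre
    simp [bScan, segs, mySplit, headIn]
  | cons c rest ih =>
    intro pre hpre
    by_cases hc : c = '/'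
    · subst hc
      simp only [bScan, BEq.rfl, if_pos]
      rw [ih pre hpre]
      have : segs ('/' :: rest) = segs rest := by simp [segs, mySplit]
      rw [this]
    · obtain ⟨h, t, he⟩ := segs_cons c rest hc
      have hne : segs (c :: rest) ≠ [] := by simp [segs, he]
      simp only [bScan, beq_iff_eq, if_neg hc]
      simp [List.isEmpty_iff, hne]

lemma scan_true : ∀ (cs pre : List Char), pre ≠ [] →
    bScan cs 1 (pre.takeWhile (· ≠ '_')) true (decide ('_' ∈ pre)) =
      (if 2 ≤ ((mySplit cs pre).filter (· ≠ [])).length then true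
       else headIn (((mySplit cs pre).filter (· ≠ [])).headD [])) := by
  intro cs
  induction cs with
  | nil =>
    intro pre hpre
    simp [bScan, mySplit, hpre, headIn]
  | cons c rest ih =>
    intro pre hpre
    by_cases hc : c = '/'
    · subst hc
      simp only [bScan, BEq.rfl, if_pos]
      rw [scan_false rest pre hpre]
      have hsp : mySplit ('/' :: rest) pre = pre :: mySplit rest [] := by simp [mySplit]
      rw [hsp]
      have hfl : (pre :: mySplit rest []).filter (· ≠ []) = pre :: segs rest := by
        simp [segs, hpre]
      rw [hfl]
      by_cases hemp : segs rest = []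
      · simp [hemp, headIn]
      · have hlen : 1 ≤ (segs rest).length := by
          cases h : segs rest with
          | nil => exact absurd h hemp
          | cons a b => simp
        simp [hemp, List.isEmpty_iff]
        omega
    · have hsp : mySplit (c :: rest) pre = mySplit rest (pre ++ [c]) := by simp [mySplit, hc]
      have hprec : pre ++ [c] ≠ [] := by simp
      rw [hsp]
      by_cases hu : c = '_'
      · subst hu
        have := ih (pre ++ ['_']) hprec
        rw [tw_append pre '_' (Or.inr rfl), (by simp : decide ('_' ∈ pre ++ ['_']) = true)] at this
        rw [← this]
        simp [bScan]
      · by_cases hm : '_' ∈ pre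
        · have := ih (pre ++ [c]) hprec
          rw [tw_append pre c (Or.inl hm), (by simp [hm] : decide ('_' ∈ pre ++ [c]) = true)] at this
          rw [← this, decide_eq_true hm]
          simp [bScan, hc, hu]
        · have := ih (pre ++ [c]) hprec
          rw [tw_self (pre ++ [c]) (by simp [hm, Ne.symm hu]),
            (by simp [hm, Ne.symm hu] : decide ('_' ∈ pre ++ [c]) = false)] at this
          rw [← this, tw_self pre hm, decide_eq_false hm]
          simp [bScan, hc, hu]

lemma scan_zero : ∀ (cs : List Char), bScan cs 0 [] false false = decideSegs (segs cs) := by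
  intro cs
  induction cs with
  | nil => simp [bScan, segs, mySplit, decideSegs]
  | cons c rest ih =>
    by_cases hc : c = '/'
    · subst hc
      simp only [bScan, BEq.rfl, if_pos]
      rw [ih]
      have : segs ('/' :: rest) = segs rest := by simp [segs, mySplit]
      rw [this]
    · obtain ⟨h, t, he⟩ := segs_cons c rest hc
      have he' : mySplit rest [c] = (c :: h) :: t := by
        have : mySplit (c :: rest) [] = mySplit rest [c] := by simp [mySplit, hc]
        rw [← this, he]
      have hseg : segs (c :: rest) = (mySplit rest [c]).filter (· ≠ []) := by
        simp [segs, mySplit, hc]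
      by_cases hu : c = '_'
      · subst hu
        have := scan_true rest ['_'] (by simp)
        rw [show (['_'].takeWhile (· ≠ '_')) = ([] : List Char) from rfl,
          show decide ('_' ∈ ['_']) = true by simp] at this
        have hdec : decideSegs (segs ('_' :: rest)) =
            (if 2 ≤ ((mySplit rest ['_']).filter (· ≠ [])).length then true
             else headIn (((mySplit rest ['_']).filter (· ≠ [])).headD [])) := by
          rw [hseg, he', decideSegs]
          simp
        rw [hdec, ← this]
        simp [bScan]
      · have := scan_true rest [c] (by simp)
        rw [show ([c].takeWhile (· ≠ '_')) = [c] from by simp [hu],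
          show decide ('_' ∈ [c]) = false by simp [Ne.symm hu]] at this
        have hdec : decideSegs (segs (c :: rest)) =
            (if 2 ≤ ((mySplit rest [c]).filter (· ≠ [])).length then true
             else headIn (((mySplit rest [c]).filter (· ≠ [])).headD [])) := by
          rw [hseg, he', decideSegs]
          simp
        rw [hdec, ← this]
        simp [bScan, hc, hu]

lemma tw_eq_iff (L A : List Char) (hA : '_' ∉ A) :
    L.takeWhile (· ≠ '_') = A ↔ L = A ∨ (A ++ ['_']) <+: L := by
  constructor
  · intro h
    cases hd : L.dropWhile (· ≠ '_') with
    | nil =>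
      left
      rw [← List.takeWhile_append_dropWhile (p := (· ≠ '_')) (l := L), h, hd, List.append_nil]
    | cons d r =>
      right
      have hdu : d = '_' := by
        have hne : L.dropWhile (· ≠ '_') ≠ [] := by rw [hd]; simp
        have := List.head_dropWhile_not (· ≠ '_') hne
        simp only [hd, List.head_cons] at this
        simpa using this
      subst hdu
      refine ⟨r, ?_⟩
      rw [← List.takeWhile_append_dropWhile (p := (· ≠ '_')) (l := L), h, hd]
      simp
  · rintro (rfl | ⟨r, hr⟩)
    · exact tw_self L hA
    · rw [← hr, List.append_assoc]
      rw [List.takeWhile_append]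
      rw [if_pos (by rw [tw_self A hA])]
      simp

lemma head_eq_action (s a : String) (ha : '_' ∉ a.toList) :
    (s == a || PySem.Str.startswith s (a ++ "_")) = decide (s.toList.takeWhile (· ≠ '_') = a.toList) := by
  rw [Bool.eq_iff_iff]
  simp only [Bool.or_eq_true, beq_iff_eq, decide_eq_true_eq, PySem.Str.startswith_eq,
    PySem.Chars.startswith_iff, String.toList_append]
  rw [show ("_" : String).toList = ['_'] from rfl, ← String.toList_inj,
    tw_eq_iff s.toList a.toList ha]

lemma any_eq_headIn (s : String) :
    ["create", "save", "update", "edit", "launch", "start", "deactivate", "delete",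
     "remove", "status", "get", "list", "detail", "preview"].any
      (fun action => s == action || PySem.Str.startswith s (action ++ "_"))
      = headIn s.toList := by
  simp only [List.any_cons, List.any_nil]
  rw [head_eq_action s "create" (by decide), head_eq_action s "save" (by decide),
    head_eq_action s "update" (by decide), head_eq_action s "edit" (by decide),
    head_eq_action s "launch" (by decide), head_eq_action s "start" (by decide),
    head_eq_action s "deactivate" (by decide), head_eq_action s "delete" (by decide),
    head_eq_action s "remove" (by decide), head_eq_action s "status" (by decide),
    head_eq_action s "get" (by decide), head_eq_action s "list" (by decide),
    head_eq_action s "detail" (by decide), head_eq_action s "preview" (by decide)]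
  simp [headIn, actionSet, PySem.Set.contains, PySem.Set.ofList]

lemma a_side (core : String) :
    (let segments := ((PySem.Str.split? core "/").getD []).filter (fun segment => !(segment == ""));
     if segments.isEmpty then false
     else if 2 ≤ segments.length then true
     else generic_route_actions.any (fun action =>
       segments.headD "" == action || PySem.Str.startswith (segments.headD "") (action ++ "_")))
      = decideSegs (segs core.toList) := by
  have hps : ((PySem.Str.split? core "/").getD []).map String.toList = mySplit core.toList [] := by
    have h := PySem.Str.split?_map core "/"
    rw [show ("/" : String).toList = ['/'] from rfl, PySem.Chars.split?] at h
    simp only [List.isEmpty_cons, Bool.false_eq_true, if_false] at h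
    cases hs : PySem.Str.split? core "/" with
    | none => rw [hs] at h; simp at h
    | some l =>
      rw [hs] at h
      simp only [Option.map_some, Option.some.injEq] at h
      simpa [splitOn_eq] using h
  have hfil : (((PySem.Str.split? core "/").getD []).filter (fun segment => !(segment == ""))).map
      String.toList = segs core.toList := by
    rw [segs, ← hps, List.filter_map]
    congr 1
    apply List.filter_congr
    intro x _
    rw [Bool.eq_iff_iff]
    simp [Function.comp, String.toList_eq_nil_iff]
  dsimp only
  rw [← hfil]
  cases hm : ((PySem.Str.split? core "/").getD []).filter (fun segment => !(segment == "")) with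
  | nil => simp [decideSegs]
  | cons a l =>
    simp only [List.map_cons, decideSegs, List.isEmpty_cons, Bool.false_eq_true, if_false,
      List.length_cons, List.length_map, List.headD_cons]
    split
    · rfl
    · rw [show generic_route_actions = ["create", "save", "update", "edit", "launch", "start",
        "deactivate", "delete", "remove", "status", "get", "list", "detail", "preview"] from rfl]
      exact any_eq_headIn a

-- ===== VERDICT (by name: the statement is the Claim_ definition above) =====
theorem is_business_route_ref_spec : Claim_equal_is_business_route_ref := by
  intro route _
  unfold Spec_is_business_route_ref is_business_route_ref is_business_route_ref_alt
  rw [a_side, PySem.Str.toList_stripChars]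
  rw [show ("/" : String).toList = ['/'] from rfl, segs_strip, scan_zero]
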